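-- pv_equiv track=rewrite | github.com/oscarsun95/CodilitySolutions_Oscar | min_perimeter_rectangle.py | solution
-- ===== SOURCE A (Python) =====
-- def solution(N):
--     # write your code in Python 3.6
--     min_peri = 2 * (N + 1)
--     i = 2
--     while i * i <= N:
--         if N % i == 0:
--             peri = 2 * (i + N // i)
--             min_peri = min(min_peri, peri)
--         i += 1
--     return min_peri
-- ===== SOURCE B (Python) =====
-- def solution(N):
--     if N < 1:
--         return 2 * (N + 1)
--     # integer square root by Newton's method (no imports needed)
--     x = N
--     y = (x + 1) // 2
--     while y < x:
--         x = y
--         y = (x + N // x) // 2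
--     # descend from isqrt(N); the first divisor found gives the min perimeter
--     i = x
--     while N % i != 0:
--         i -= 1
--     return 2 * (i + N // i)
-- ===== Notes on version B (the rewrite author's own statement) =====
-- stated objective: alternative
-- what changed: Instead of scanning all i from 2 up to sqrt(N) while maintaining a running minimum, B computes isqrt(N) by Newton's method and descends from it, returning 2*(i + N//i) at the first divisor found (the largest divisor <= sqrt(N) already minimizes the perimeter, so no running minimum is kept).
import Mathlib
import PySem

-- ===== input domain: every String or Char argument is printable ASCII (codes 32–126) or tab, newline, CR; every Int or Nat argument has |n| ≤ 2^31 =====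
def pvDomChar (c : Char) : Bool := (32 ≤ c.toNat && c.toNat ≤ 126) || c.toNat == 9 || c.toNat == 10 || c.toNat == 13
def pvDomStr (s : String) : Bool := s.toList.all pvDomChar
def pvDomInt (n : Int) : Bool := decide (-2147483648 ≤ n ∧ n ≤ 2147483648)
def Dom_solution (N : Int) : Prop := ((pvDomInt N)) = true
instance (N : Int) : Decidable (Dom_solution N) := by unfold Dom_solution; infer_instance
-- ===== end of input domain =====

-- B replaces A's ascending scan with a running minimum by Newton isqrt + descent to the
-- first divisor (alternative decomposition; same worst-case cost).

-- ===== PORT A =====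
-- the while loop of A: i ascends while i*i <= N, maintaining the running minimum
def loopA (n i m : Int) : Int :=
  if h : i * i ≤ n then
    loopA n (i + 1)
      (if PySem.Int.mod n i = 0 then min m (2 * (i + PySem.Int.floordiv n i)) else m)
  else m
termination_by (n + 1 - i).toNat
decreasing_by
  have hin : i ≤ n := by
    rcases le_or_gt i 0 with h0 | h0
    · nlinarith
    · nlinarith
  omega

def solution (N : Int) : Int := loopA N 2 (2 * (N + 1))

-- ===== PORT B =====
-- Newton iteration: x = y; y = (x + N // x) // 2 while y < x (0 < y is a totality guard;
-- it always holds on the reachable states, where y ≥ 1)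
def sqrtLoop (n x y : Int) : Int :=
  if _h : y < x ∧ 0 < y then
    sqrtLoop n y (PySem.Int.floordiv (y + PySem.Int.floordiv n y) 2)
  else x
termination_by x.toNat
decreasing_by omega

-- descent: i -= 1 while N % i != 0 (0 < i is a totality guard; i = 1 always stops the loop)
def findDiv (n i : Int) : Int :=
  if _h : 0 < i ∧ PySem.Int.mod n i ≠ 0 then findDiv n (i - 1) else i
termination_by i.toNat
decreasing_by omega

def solution_alt (N : Int) : Int :=
  if N < 1 then 2 * (N + 1)
  else
    let x := sqrtLoop N N (PySem.Int.floordiv (N + 1) 2)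
    let i := findDiv N x
    2 * (i + PySem.Int.floordiv N i)

-- ===== PRECONDITION & SPEC =====
def Spec_solution (N : Int) (out : Int) : Prop := out = solution_alt N
instance (N : Int) (out : Int) : Decidable (Spec_solution N out) := by unfold Spec_solution; infer_instance

-- ===== CLAIM (what is proved, stated in full; the proofs are below) =====
def Claim_equal_solution : Prop := ∀ (N : Int), Dom_solution N → Spec_solution N (solution N)

-- ===== LEMMAS AND PROOFS =====

-- perimeter is antitone in the divisor below sqrt(N)
lemma peri_mono (n d1 d2 : Int) (h1 : d1 ∣ n) (h2 : d2 ∣ n) (hd1 : 1 ≤ d1)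
    (hlt : d1 < d2) (hs : d2 * d2 ≤ n) : d2 + n / d2 ≤ d1 + n / d1 := by
  obtain ⟨q1, hq1⟩ := h1
  obtain ⟨q2, hq2⟩ := h2
  have e1 : n / d1 = q1 := by rw [hq1]; exact Int.mul_ediv_cancel_left _ (by omega)
  have e2 : n / d2 = q2 := by rw [hq2]; exact Int.mul_ediv_cancel_left _ (by omega)
  have hd2q2 : d2 ≤ q2 := by nlinarith
  rw [e1, e2]
  nlinarith [mul_nonneg (by omega : (0:Int) ≤ d2 - d1) (by omega : (0:Int) ≤ q2 - d1)]

-- one Newton step stays at or above every candidate isqrt lower bound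
lemma step_ge (n x d : Int) (hn : 1 ≤ n) (hx : 1 ≤ x) (hdd : d * d ≤ n) :
    d ≤ (x + n / x) / 2 := by
  rw [Int.le_ediv_iff_mul_le (by omega : (0:Int) < 2)]
  have hnx : 2 * d - x ≤ n / x ∨ 2 * d - x ≤ 0 := by
    rcases le_or_gt (2 * d - x) 0 with h | h
    · exact Or.inr h
    · left
      rw [Int.le_ediv_iff_mul_le (by omega : (0:Int) < x)]
      nlinarith [sq_nonneg (d - x)]
  have h0 : 0 ≤ n / x := Int.ediv_nonneg (by omega) (by omega)
  rcases hnx with h | h <;> omega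

lemma sqrtLoop_spec (n : Int) (hn : 1 ≤ n) :
    ∀ (k : Nat) x y, x.toNat ≤ k → 1 ≤ x → y = (x + n / x) / 2 →
      (∀ d, 1 ≤ d → d * d ≤ n → d ≤ x) →
      (sqrtLoop n x y) * (sqrtLoop n x y) ≤ n ∧ 1 ≤ sqrtLoop n x y ∧
      (∀ d, 1 ≤ d → d * d ≤ n → d ≤ sqrtLoop n x y) := by
  intro k
  induction k with
  | zero => intro x y hxk hx _ _; exfalso; omega
  | succ k ih =>
    intro x y hxk hx hy hinv
    have hy1 : 1 ≤ y := hy ▸ step_ge n x 1 hn hx (by nlinarith)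
    rw [sqrtLoop]
    by_cases hc : y < x ∧ 0 < y
    · rw [dif_pos hc]
      apply ih y _ (by omega) hy1
      · rw [PySem.Int.floordiv_eq_ediv_of_pos (by omega : (0:Int) < 2),
            PySem.Int.floordiv_eq_ediv_of_pos (by omega : (0:Int) < y)]
      · intro d hd hdd
        exact hy ▸ step_ge n x d hn hx hdd
    · rw [dif_neg hc]
      have hxy : x ≤ y := by
        rcases not_and_or.mp hc with h | h
        · omega
        · omega
      have h2x : x * 2 ≤ x + n / x := by
        have := hxy.trans_eq hy.symm.symm
        rw [hy] at hxy
        rwa [Int.le_ediv_iff_mul_le (by omega : (0:Int) < 2)] at hxy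
      have hxn : x * x ≤ n := by
        have : x ≤ n / x := by omega
        rwa [Int.le_ediv_iff_mul_le (by omega : (0:Int) < x)] at this
      exact ⟨hxn, hx, hinv⟩

-- properties of the descent
lemma findDiv_spec (n : Int) : ∀ i, 1 ≤ i →
    findDiv n i ∣ n ∧ 1 ≤ findDiv n i ∧ findDiv n i ≤ i ∧
    (∀ d, findDiv n i < d → d ≤ i → ¬ d ∣ n) := by
  have key : ∀ (k : Nat) i, i.toNat ≤ k → 1 ≤ i →
      findDiv n i ∣ n ∧ 1 ≤ findDiv n i ∧ findDiv n i ≤ i ∧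
      (∀ d, findDiv n i < d → d ≤ i → ¬ d ∣ n) := by
    intro k
    induction k with
    | zero => intro i hik hi; exfalso; omega
    | succ k ih =>
      intro i hik hi
      rw [findDiv]
      by_cases hc : 0 < i ∧ PySem.Int.mod n i ≠ 0
      · rw [dif_pos hc]
        have hnd : ¬ i ∣ n := fun hd => hc.2 ((PySem.Int.mod_eq_zero_iff_dvd n i).mpr hd)
        have hi2 : 2 ≤ i := by
          rcases eq_or_lt_of_le hi with h | h
          · exfalso; apply hc.2; rw [← h]; simp [PySem.Int.mod]
          · omega
        obtain ⟨h1, h2, h3, h4⟩ := ih (i - 1) (by omega) (by omega)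
        refine ⟨h1, h2, by omega, fun d hrd hdi => ?_⟩
        rcases eq_or_lt_of_le hdi with h | h
        · exact h ▸ hnd
        · exact h4 d hrd (by omega)
      · rw [dif_neg hc]
        have : PySem.Int.mod n i = 0 := by
          rcases not_and_or.mp hc with h | h
          · omega
          · exact not_not.mp h
        exact ⟨(PySem.Int.mod_eq_zero_iff_dvd n i).mp this, hi, le_refl i,
               fun d h1 h2 => absurd (by omega : i < i) (lt_irrefl i)⟩
  exact fun i hi => key i.toNat i (le_refl _) hi

-- A's loop computes min m (perimeter at g), g the largest divisor with g*g ≤ n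
lemma loopA_eq (n g : Int) (hg1 : 1 ≤ g) (hgd : g ∣ n) (hgs : g * g ≤ n)
    (hmax : ∀ d, 1 ≤ d → d ∣ n → d * d ≤ n → d ≤ g) :
    ∀ i m, 2 ≤ i → loopA n i m = if i ≤ g then min m (2 * (g + n / g)) else m := by
  have key : ∀ (k : Nat) i m, (n + 1 - i).toNat ≤ k → 2 ≤ i →
      loopA n i m = if i ≤ g then min m (2 * (g + n / g)) else m := by
    intro k
    induction k with
    | zero =>
      intro i m hik hi
      rw [loopA]
      have hni : ¬ i * i ≤ n := by
        intro h
        have hin : i ≤ n := by nlinarith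
        omega
      rw [dif_neg hni, if_neg (by intro h; nlinarith)]
    | succ k ih =>
      intro i m hik hi
      rw [loopA]
      by_cases hii : i * i ≤ n
      · rw [dif_pos hii]
        have hin : i ≤ n := by nlinarith
        rw [ih (i + 1) _ (by omega) (by omega)]
        by_cases hmod : PySem.Int.mod n i = 0
        · have hdvd : i ∣ n := (PySem.Int.mod_eq_zero_iff_dvd n i).mp hmod
          have hig : i ≤ g := hmax i (by omega) hdvd hii
          rw [if_pos (show i ≤ g by omega)]
          rw [if_pos hmod, PySem.Int.floordiv_eq_ediv_of_pos (by omega : (0:Int) < i)]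
          rcases eq_or_lt_of_le hig with h | h
          · rw [if_neg (by omega), h]
          · rw [if_pos (by omega)]
            have := peri_mono n i g hdvd hgd (by omega) h hgs
            omega
        · rw [if_neg hmod]
          have hne : i ≠ g := by
            intro h; apply hmod
            exact (PySem.Int.mod_eq_zero_iff_dvd n i).mpr (h ▸ hgd)
          by_cases hig : i ≤ g
          · rw [if_pos (by omega), if_pos hig]
          · rw [if_neg (by omega), if_neg hig]
      · rw [dif_neg hii]
        rw [if_neg (by intro h; nlinarith)]
  exact fun i m hi => key (n + 1 - i).toNat i m (le_refl _) hi

-- ===== VERDICT (by name: the statement is the Claim_ definition above) =====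
theorem solution_spec : Claim_equal_solution := by
  intro N _
  unfold Spec_solution solution solution_alt
  by_cases hN : N < 1
  · rw [if_pos hN, loopA]
    rw [dif_neg (by omega : ¬ (2:Int) * 2 ≤ N)]
  · rw [if_neg hN]
    have hn : 1 ≤ N := by omega
    have hy0 : PySem.Int.floordiv (N + 1) 2 = (N + N / N) / 2 := by
      rw [PySem.Int.floordiv_eq_ediv_of_pos (by omega : (0:Int) < 2),
          Int.ediv_self (by omega : N ≠ 0)]
    obtain ⟨hr2, hr1, hrmax⟩ := sqrtLoop_spec N hn N.toNat N
      (PySem.Int.floordiv (N + 1) 2) (le_refl _) hn hy0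
      (fun d hd hdd => by nlinarith)
    set r := sqrtLoop N N (PySem.Int.floordiv (N + 1) 2) with hrdef
    obtain ⟨hgd, hg1, hgr, hgtop⟩ := findDiv_spec N r hr1
    set g := findDiv N r with hgdef
    have hgs : g * g ≤ N := by nlinarith
    have hmax : ∀ d, 1 ≤ d → d ∣ N → d * d ≤ N → d ≤ g := by
      intro d hd hdvd hdd
      by_contra hlt
      exact hgtop d (by omega) (hrmax d hd hdd) hdvd
    rw [loopA_eq N g hg1 hgd hgs hmax 2 (2 * (N + 1)) (le_refl 2)]
    show (if 2 ≤ g then min (2 * (N + 1)) (2 * (g + N / g)) else 2 * (N + 1)) =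
      2 * (g + PySem.Int.floordiv N g)
    rw [PySem.Int.floordiv_eq_ediv_of_pos (by omega : (0:Int) < g)]
    by_cases h2g : 2 ≤ g
    · rw [if_pos h2g]
      have := peri_mono N 1 g (one_dvd N) hgd (le_refl 1) (by omega) hgs
      rw [Int.ediv_one] at this
      omega
    · rw [if_neg h2g]
      have hg : g = 1 := by omega
      rw [hg, Int.ediv_one]
      ring
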